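-- pv_equiv track=rewrite | github.com/philopateerreda/IEEEVictorees4 | analysis_tool/analysis.py | _clean_llm_response
-- ===== SOURCE A (Python) =====
-- def _clean_llm_response(response: str) -> str:
--     """Clean the LLM response to remove unwanted instruction text and formatting issues."""
--     if not response:
--         return response
--
--     # Remove common instruction patterns that might appear in output
--     unwanted_patterns = [
--         "INSTRUCTIONS:",
--         "For each question above, provide your analysis",
--         "Begin your analysis:",
--         "Begin your analysis now:",
--         "Provide your analysis for each question",
--         "Follow the exact format requested",
--         "This is a fresh analysis session"
--     ]
--
--     cleaned = response
--     for pattern in unwanted_patterns: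
--         # Remove the pattern and any text on the same line
--         lines = cleaned.split('\n')
--         cleaned_lines = []
--         for line in lines:
--             if pattern.lower() not in line.lower():
--                 cleaned_lines.append(line)
--         cleaned = '\n'.join(cleaned_lines)
--
--     # Remove excessive whitespace while preserving structure
--     cleaned = '\n'.join(line.strip() for line in cleaned.split('\n') if line.strip())
--
--     return cleaned.strip()
-- ===== SOURCE B (Python) =====
-- def _clean_llm_response(response: str) -> str:
--     """Clean the LLM response: one pass over the lines, dropping blank lines and
--     lines containing any unwanted instruction pattern, then join and strip."""
--     if not response:
--         return response
--
--     patterns = [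
--         "instructions:",
--         "for each question above, provide your analysis",
--         "begin your analysis:",
--         "begin your analysis now:",
--         "provide your analysis for each question",
--         "follow the exact format requested",
--         "this is a fresh analysis session",
--     ]
--
--     kept = []
--     for line in response.split('\n'):
--         stripped = line.strip()
--         if not stripped:
--             continue
--         low = line.lower()
--         if any(p in low for p in patterns):
--             continue
--         kept.append(stripped)
--     return '\n'.join(kept).strip()
-- ===== Notes on version B (the rewrite author's own statement) =====
-- stated objective: simpler
-- what changed: A makes seven split/filter/join passes over the text (one per pattern) plus a final whitespace pass; B splits once and makes a single pass over the lines, dropping blank lines and pattern-matching lines and collecting stripped lines directly.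
import Mathlib
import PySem

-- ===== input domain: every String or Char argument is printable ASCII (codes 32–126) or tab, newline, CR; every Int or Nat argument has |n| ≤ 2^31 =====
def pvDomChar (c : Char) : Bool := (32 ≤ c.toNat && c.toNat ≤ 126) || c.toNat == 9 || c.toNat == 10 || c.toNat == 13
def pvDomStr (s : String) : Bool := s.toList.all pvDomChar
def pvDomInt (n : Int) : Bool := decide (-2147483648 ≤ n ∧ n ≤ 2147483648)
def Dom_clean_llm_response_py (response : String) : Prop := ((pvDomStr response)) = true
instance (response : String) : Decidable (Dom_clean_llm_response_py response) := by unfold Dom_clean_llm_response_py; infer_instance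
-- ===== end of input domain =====

-- B makes a single pass over the lines instead of A's seven split/filter/join passes (one per pattern) plus a final whitespace pass; same result.

-- ===== PORT A =====
-- the unwanted_patterns literal of A
def pvPatterns : List String :=
  ["INSTRUCTIONS:",
   "For each question above, provide your analysis",
   "Begin your analysis:",
   "Begin your analysis now:",
   "Provide your analysis for each question",
   "Follow the exact format requested",
   "This is a fresh analysis session"]

-- s.split('\n'): the separator is the nonempty literal '\n', so Python's split is exactly
-- PySem.Chars.splitOn on the code points (PySem.Str.split? unwrapped for a nonempty separator)
def pvSplitNL (s : String) : List String :=
  (PySem.Chars.splitOn s.toList ['\n']).map String.ofList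

-- the body of A's `for pattern in unwanted_patterns` loop: split, keep the
-- lines not containing the pattern case-insensitively, re-join
def pvPass (cleaned : String) (pattern : String) : String :=
  let lines := pvSplitNL cleaned
  let cleaned_lines := lines.foldl (fun acc line =>
    if !(PySem.Str.isIn (PySem.Str.lower pattern) (PySem.Str.lower line)) then acc ++ [line]
    else acc) ([] : List String)
  PySem.Str.join "\n" cleaned_lines

def clean_llm_response_py (response : String) : String :=
  if response == "" then response
  else
    let cleaned := pvPatterns.foldl pvPass response
    let cleaned := PySem.Str.join "\n"
      (((pvSplitNL cleaned).filter (fun line => !(PySem.Str.strip line == ""))).map PySem.Str.strip)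
    PySem.Str.strip cleaned

-- ===== PORT B =====
-- the (already lowercase) pattern literals of B
def pvPatternsLower : List String :=
  ["instructions:",
   "for each question above, provide your analysis",
   "begin your analysis:",
   "begin your analysis now:",
   "provide your analysis for each question",
   "follow the exact format requested",
   "this is a fresh analysis session"]

-- the body of B's single `for line in response.split('\n')` loop
def pvStep (kept : List String) (line : String) : List String :=
  let stripped := PySem.Str.strip line
  if stripped == "" then kept
  else
    let low := PySem.Str.lower line
    if pvPatternsLower.any (fun p => PySem.Str.isIn p low) then kept
    else kept ++ [stripped]

def clean_llm_response_py_alt (response : String) : String :=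
  if response == "" then response
  else
    let kept := (pvSplitNL response).foldl pvStep ([] : List String)
    PySem.Str.strip (PySem.Str.join "\n" kept)

-- ===== PRECONDITION & SPEC =====
def Spec_clean_llm_response_py (response : String) (out : String) : Prop := out = clean_llm_response_py_alt response
instance (response : String) (out : String) : Decidable (Spec_clean_llm_response_py response out) := by unfold Spec_clean_llm_response_py; infer_instance

-- ===== CLAIM (what is proved, stated in full; the proofs are below) =====
def Claim_equal_clean_llm_response_py : Prop := ∀ (response : String), Dom_clean_llm_response_py response → Spec_clean_llm_response_py response (clean_llm_response_py response)

-- ===== LEMMAS AND PROOFS =====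

theorem pvGo_spec (c : Char) (fuel : Nat) (l cur : List Char) (acc : List (List Char)) (h : l.length ≤ fuel) :
    PySem.Chars.splitOn.go [c] fuel l cur acc =
      acc.reverse ++ (List.splitOn c l).modifyHead (cur.reverse ++ ·) := by
  induction fuel generalizing l cur acc with
  | zero =>
    have : l = [] := List.length_eq_zero_iff.mp (Nat.le_zero.mp h)
    subst this
    simp [PySem.Chars.splitOn.go, List.splitOn_nil]
  | succ fuel ih =>
    cases l with
    | nil => simp [PySem.Chars.splitOn.go, List.splitOn_nil]
    | cons x rest =>
      rw [PySem.Chars.splitOn.go]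
      simp only [List.isPrefixOf, Bool.and_true]
      by_cases hc : c = x
      · subst hc
        simp only [beq_self_eq_true, if_pos]
        rw [ih _ _ _ (by simpa using Nat.le_of_succ_le_succ (by simpa using h))]
        simp [List.splitOn, List.splitOnP_cons, List.modifyHead]
        cases List.splitOnP (fun x => x == c) rest <;> rfl
      · have hb : (c == x) = false := by simp [hc]
        simp only [hb, if_neg, Bool.false_eq_true, not_false_iff]
        rw [ih _ _ _ (by simpa using Nat.le_of_succ_le_succ (by simpa using h))]
        simp only [List.splitOn, List.splitOnP_cons]
        rw [if_neg (by simpa using fun h2 : x = c => hc h2.symm), List.modifyHead_modifyHead]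
        have hf : (fun t => (x :: cur).reverse ++ t) = ((fun t : List Char => cur.reverse ++ t) ∘ List.cons x) := by
          funext t; simp [Function.comp_def]
        rw [hf]

theorem pvSplitOn_eq (c : Char) (s : List Char) :
    PySem.Chars.splitOn s [c] = List.splitOn c s := by
  rw [PySem.Chars.splitOn, pvGo_spec c _ s [] [] (Nat.le_succ _)]
  simp only [List.reverse_nil, List.nil_append]
  cases List.splitOn c s <;> rfl

theorem pvSplitOnP_ne_nil {a : Type} (p : a -> Bool) (xs : List a) : List.splitOnP p xs ≠ [] := by
  induction xs with
  | nil => simp [List.splitOnP_nil]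
  | cons x xs ih =>
    rw [List.splitOnP_cons]
    split
    · simp
    · cases h : List.splitOnP p xs with
      | nil => exact absurd h ih
      | cons a t => simp

theorem pvMem_splitOn (c : Char) (s : List Char) : ∀ l ∈ List.splitOn c s, c ∉ l := by
  rw [List.splitOn]
  induction s with
  | nil => simp [List.splitOnP_nil]
  | cons x rest ih =>
    rw [List.splitOnP_cons]
    split
    · intro l hl
      rcases List.mem_cons.mp hl with h | h
      · simp [h]
      · exact ih l h
    · rename_i hx
      have hcx : c ≠ x := by intro h; subst h; simp at hx
      cases h : List.splitOnP (fun a => a == c) rest with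
      | nil => exact absurd h (pvSplitOnP_ne_nil _ _)
      | cons a t =>
        rw [h] at ih
        simp only [List.modifyHead]
        intro l hl
        rcases List.mem_cons.mp hl with h2 | h2
        · subst h2
          intro hmem
          rcases List.mem_cons.mp hmem with h3 | h3
          · exact hcx h3
          · exact (ih a List.mem_cons_self) h3
        · exact ih l (List.mem_cons_of_mem a h2)

theorem pvJoin_splitOn (c : Char) (s : List Char) :
    PySem.Chars.join [c] (List.splitOn c s) = s :=
  List.intercalate_splitOn s c

theorem pvSplitOn_join (c : Char) (ls : List (List Char)) (hne : ls ≠ [])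
    (hfree : ∀ l ∈ ls, c ∉ l) :
    List.splitOn c (PySem.Chars.join [c] ls) = ls :=
  List.splitOn_intercalate ls c hfree hne

-- keep-predicates on the char-list side
def pvKeepC (p : String) (l : List Char) : Bool :=
  !(PySem.Chars.isIn (PySem.Chars.lower p.toList) (PySem.Chars.lower l))

def pvKeepAllC (ps : List String) (l : List Char) : Bool :=
  ps.all (fun p => pvKeepC p l)

def pvSneC (l : List Char) : Bool := !(PySem.Chars.strip l).isEmpty

theorem pvPass_step (p : String) (F : List (List Char))
    (hp : p.toList ≠ []) (hF : ∀ l ∈ F, '\n' ∉ l) :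
    pvPass (String.ofList (PySem.Chars.join ['\n'] F)) p =
      String.ofList (PySem.Chars.join ['\n'] (F.filter (pvKeepC p))) := by
  unfold pvPass pvSplitNL
  simp only []
  rw [show (fun (acc : List String) (line : String) =>
        if (!PySem.Str.isIn (PySem.Str.lower p) (PySem.Str.lower line)) = true then acc ++ [line] else acc)
      = (fun (acc : List String) (line : String) =>
        if (fun line => !PySem.Str.isIn (PySem.Str.lower p) (PySem.Str.lower line)) line = true then acc ++ [id line] else acc) from rfl]
  rw [PySem.List.foldl_append_if]
  simp only [List.map_id, List.nil_append, String.toList_ofList, pvSplitOn_eq]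
  cases F with
  | nil =>
    have hlow : PySem.Chars.lower p.toList ≠ [] := by
      simpa [PySem.Chars.lower] using hp
    have hkeep : (!PySem.Chars.isIn (PySem.Chars.lower p.toList) (PySem.Chars.lower ([] : List Char))) = true := by
      simp only [Bool.not_eq_true']
      rw [PySem.Chars.isIn_eq_false_iff]
      intro hinf
      exact hlow (List.infix_nil.mp (by simpa [PySem.Chars.lower] using hinf))
    simp only [PySem.Chars.join_nil, List.splitOn_nil, List.map_cons, List.map_nil, List.filter,
      PySem.Str.isIn_eq, PySem.Str.toList_lower, String.toList_ofList]
    rw [hkeep]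
    decide
  | cons f0 Fs =>
    rw [pvSplitOn_join _ _ (by simp) hF]
    rw [List.filter_map]
    have hpred : ((fun line => !(PySem.Str.isIn (PySem.Str.lower p) (PySem.Str.lower line))) ∘ String.ofList) = pvKeepC p := by
      funext l
      simp [Function.comp, pvKeepC, PySem.Str.isIn_eq, PySem.Str.toList_lower]
    rw [hpred]
    rw [PySem.Str.join]
    simp [List.map_map, Function.comp_def]

theorem pvPass_fold (ps : List String) (F : List (List Char))
    (hps : ∀ p ∈ ps, p.toList ≠ []) (hF : ∀ l ∈ F, '\n' ∉ l) :
    ps.foldl pvPass (String.ofList (PySem.Chars.join ['\n'] F)) =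
      String.ofList (PySem.Chars.join ['\n'] (F.filter (pvKeepAllC ps))) := by
  induction ps generalizing F with
  | nil =>
    congr 1
    rw [List.foldl_nil,
      List.filter_congr (fun l _ => by simp [pvKeepAllC] : ∀ l ∈ F, pvKeepAllC [] l = true), List.filter_true]
  | cons p ps ih =>
    rw [List.foldl_cons, pvPass_step p F (hps p List.mem_cons_self) hF]
    rw [ih (F.filter (pvKeepC p)) (fun q hq => hps q (List.mem_cons_of_mem p hq)) (fun l hl => hF l (List.mem_filter.mp hl).1)]
    rw [List.filter_filter]
    congr 2
    apply List.filter_congr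
    intro l _
    simp [pvKeepAllC, Bool.and_comm]

theorem pvBeqEmpty (l : List Char) : ((String.ofList l == "") = l.isEmpty) := by
  cases l with
  | nil => decide
  | cons c t =>
    simp only [List.isEmpty_cons]
    rw [beq_eq_false_iff_ne]
    intro h
    have := congrArg String.toList h
    simp at this

theorem pvFinalA (F : List (List Char)) (hF : ∀ l ∈ F, '\n' ∉ l) :
    ((List.map String.ofList (List.splitOn '\n' (PySem.Chars.join ['\n'] F))).filter
        (fun line => !(PySem.Str.strip line == ""))).map PySem.Str.strip
      = (F.filter pvSneC).map (fun l => PySem.Str.strip (String.ofList l)) := by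
  cases F with
  | nil => decide
  | cons f0 Fs =>
    rw [pvSplitOn_join _ _ (by simp) hF, List.filter_map]
    have hpred : ((fun line => !(PySem.Str.strip line == "")) ∘ String.ofList) = pvSneC := by
      funext l
      simp only [Function.comp, pvSneC]
      rw [show PySem.Str.strip (String.ofList l) = String.ofList (PySem.Chars.strip l) by
        rw [PySem.Str.strip, String.toList_ofList]]
      rw [pvBeqEmpty]
    rw [hpred, List.map_map]
    rfl

theorem pvPatternsLower_eq : pvPatternsLower = pvPatterns.map PySem.Str.lower := by decide

theorem pvStep_eq : pvStep = (fun kept line =>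
    if ((!(PySem.Str.strip line == "")) &&
        !(pvPatternsLower.any (fun p => PySem.Str.isIn p (PySem.Str.lower line)))) = true
    then kept ++ [PySem.Str.strip line] else kept) := by
  funext kept line
  unfold pvStep
  simp only []
  cases h1 : (PySem.Str.strip line == "") <;>
    cases h2 : pvPatternsLower.any (fun p => PySem.Str.isIn p (PySem.Str.lower line)) <;>
      simp [h1]

theorem pvCondB (l : List Char) :
    ((!(PySem.Str.strip (String.ofList l) == "")) &&
      !(pvPatternsLower.any (fun p => PySem.Str.isIn p (PySem.Str.lower (String.ofList l)))))
    = (pvSneC l && pvKeepAllC pvPatterns l) := by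
  congr 1
  · rw [show PySem.Str.strip (String.ofList l) = String.ofList (PySem.Chars.strip l) by
      rw [PySem.Str.strip, String.toList_ofList], pvBeqEmpty]
    rfl
  · congr 1
    rw [pvPatternsLower_eq, List.any_map]
    unfold pvKeepAllC
    rw [List.all_eq_not_any_not]
    simp [Function.comp_def, PySem.Str.isIn_eq, PySem.Str.toList_lower, String.toList_ofList, pvKeepC]

-- ===== VERDICT (by name: the statement is the Claim_ definition above) =====
theorem clean_llm_response_py_spec : Claim_equal_clean_llm_response_py := by
  intro response _
  unfold Spec_clean_llm_response_py clean_llm_response_py clean_llm_response_py_alt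
  by_cases hresp : response = ""
  · rw [hresp]; simp
  · have hbe : (response == "") = false := beq_eq_false_iff_ne.mpr hresp
    rw [hbe]
    simp only [Bool.false_eq_true, if_false]
    have hLfree := pvMem_splitOn '\n' response.toList
    have h0 : response = String.ofList (PySem.Chars.join ['\n'] (List.splitOn '\n' response.toList)) := by
      rw [pvJoin_splitOn, String.ofList_toList]
    conv_lhs => rw [h0]
    conv_rhs => rw [h0]
    rw [pvPass_fold pvPatterns _ (by decide) hLfree]
    unfold pvSplitNL
    rw [String.toList_ofList, pvSplitOn_eq,
      pvFinalA _ (fun l hl => hLfree l (List.mem_filter.mp hl).1)]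
    rw [String.toList_ofList, pvSplitOn_eq,
      pvSplitOn_join _ _ (by rw [List.splitOn]; exact pvSplitOnP_ne_nil _ _) hLfree]
    rw [pvStep_eq, PySem.List.foldl_append_if, List.filter_map]
    rw [show ((fun line => ((!(PySem.Str.strip line == "")) &&
          !(pvPatternsLower.any (fun p => PySem.Str.isIn p (PySem.Str.lower line))))) ∘ String.ofList)
        = (fun l => pvSneC l && pvKeepAllC pvPatterns l) from funext (fun l => pvCondB l)]
    rw [List.filter_filter, List.map_map, List.nil_append]
    rfl
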